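-- pv_equiv track=rewrite | github.com/brunchmate/-AlgorithmStudy | guts27/2021 KAKAO BLIND RECRUITMENT/매출하락최소화.py | solution
-- ===== SOURCE A (Python) =====
-- def find(root,dic,arr):
--     min_num = dic[root]
--     key = root
--     for a in arr[root]:
--         if min_num > dic[a]:
--             min_num = dic[a]
--             key = a
--     return min_num,key
--
-- def solution(sales, links):
--     answer = 0
--     arr2 = []
--     dic = {}
--     for i in range(len(sales)):
--         dic[i+1] = sales[i]
--     arr = [[] for _ in range(len(sales)+1)]
--     for x,y in links:
--         arr[x].append(y)
--     num = 0
--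
--     for i in range(1,len(arr)):
--         if len(arr[i]) == 0:
--             continue
--         min1,key = find(i,dic,arr)
--         for a in arr[i]:
--             if len(arr[a]) != 0 :
--                 min2,key2 = find(a,dic,arr)
--                 if dic[a] < min1+min2:
--                     arr2.append((dic[a],a))
--                 else:
--                     arr2.append((min1,key))
--                     arr2.append((min2,key2))
--
--     for x,y in arr2:
--         answer+=x
--     return answer
-- ===== SOURCE B (Python) =====
-- def solution(sales, links):
--     n = len(sales)
--     dic = {i + 1: s for i, s in enumerate(sales)}
--     children = {}
--     for x, y in links:
--         children[x] = children.get(x, []) + [y]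
--     best = {}
--     for i in range(1, n + 1):
--         b = dic[i]
--         for c in children.get(i, []):
--             b = min(b, dic[c])
--         best[i] = b
--     answer = 0
--     for x, y in links:
--         if x in best and children.get(y):
--             answer += min(dic[y], best[x] + best[y])
--     return answer
-- ===== Notes on version B (the rewrite author's own statement) =====
-- stated objective: simpler
-- what changed: B drops A's arr2 pair list, key tracking and per-edge find() rescans: it builds the node->sales dict, a children table and a best-value table (min of a node and its direct children) once, then accumulates the answer in a single pass over the flat links list, adding min(dic[y], best[x]+best[y]) for each edge whose child is internal.
-- intended difference: On links containing an edge whose first component x lies in [-n,-1] and whose wraparound is observable (the edge's child has outgoing edges, or node n+1+x has another in- or out-edge), A hangs the edge under node n+1+x via Python negative-index wraparound and adds that node's subtree minima to the sum (e.g. 3 on the witness), while B returns the sum over edges between actual nodes 1..n only (0 on the witness) — the intended reading, since node ids are 1..n. — e.g. on solution([3, 1, 2], [(-1, 2), (2, 3)]): A returns 3, B returns 0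
import Mathlib
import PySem

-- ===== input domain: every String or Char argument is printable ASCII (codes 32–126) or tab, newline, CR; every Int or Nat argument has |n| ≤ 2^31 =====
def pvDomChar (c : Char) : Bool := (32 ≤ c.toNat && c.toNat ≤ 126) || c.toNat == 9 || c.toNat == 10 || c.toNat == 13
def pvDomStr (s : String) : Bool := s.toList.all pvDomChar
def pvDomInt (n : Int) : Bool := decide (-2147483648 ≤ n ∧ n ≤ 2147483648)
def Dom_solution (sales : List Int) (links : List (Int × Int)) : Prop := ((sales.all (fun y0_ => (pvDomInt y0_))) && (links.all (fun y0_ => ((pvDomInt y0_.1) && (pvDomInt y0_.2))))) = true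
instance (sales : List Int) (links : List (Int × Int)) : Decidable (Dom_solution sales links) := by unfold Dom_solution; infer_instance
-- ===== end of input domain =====

-- B replaces A's per-edge rescans and the arr2 pair list by one precomputed best-value table and a
-- single pass over the flat links list (objective: simpler); equality proved outside D_solution below.

-- ===== PORT A =====
-- find(root, dic, arr): dic[root]/dic[a] are ported as getD 0 — exact wherever the Python call
-- returns (Pre_solution excludes the KeyError inputs).
def pvFindA (dic : PySem.Dict Int Int) (arr : List (List Int)) (root : Int) : Int × Int :=
  (PySem.List.pyGetD arr root []).foldl
    (fun p a => if p.1 > dic.getD a 0 then (dic.getD a 0, a) else p)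
    (dic.getD root 0, root)

-- arr[x].append(y) is ported with pySetD/pyGetD (total forms): exact on Pre_solution, which
-- requires every index x to be in Python range for arr (the IndexError inputs are excluded).
def solution (sales : List Int) (links : List (Int × Int)) : Int :=
  let dic : PySem.Dict Int Int :=
    (PySem.List.pyRange 0 (PySem.List.len sales) 1).foldl
      (fun d i => d.insert (i + 1) (PySem.List.pyGetD sales i 0)) PySem.Dict.empty
  let arr0 : List (List Int) :=
    (PySem.List.pyRange 0 (PySem.List.len sales + 1) 1).map (fun _ => [])
  let arr : List (List Int) :=
    links.foldl
      (fun ar q => PySem.List.pySetD ar q.1 (PySem.List.pyGetD ar q.1 [] ++ [q.2])) arr0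
  let arr2 : List (Int × Int) :=
    (PySem.List.pyRange 1 (PySem.List.len arr) 1).foldl
      (fun acc i =>
        if (PySem.List.pyGetD arr i []).length = 0 then acc
        else
          let m1 := pvFindA dic arr i
          (PySem.List.pyGetD arr i []).foldl
            (fun acc2 a =>
              if (PySem.List.pyGetD arr a []).length ≠ 0 then
                let m2 := pvFindA dic arr a
                if dic.getD a 0 < m1.1 + m2.1 then acc2 ++ [(dic.getD a 0, a)]
                else acc2 ++ [m1, m2]
              else acc2)
            acc)
      ([] : List (Int × Int))
  arr2.foldl (fun s q => s + q.1) 0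

-- ===== PORT B =====
-- children[x] = children.get(x, []) + [y] is Dict.modify; dic[y]/best[...] lookups are getD 0,
-- exact wherever the Python returns (inside Pre_solution).
def solution_alt (sales : List Int) (links : List (Int × Int)) : Int :=
  let dic : PySem.Dict Int Int :=
    (PySem.List.enumerate sales 0).foldl
      (fun d p => d.insert (p.1 + 1) p.2) PySem.Dict.empty
  let children : PySem.Dict Int (List Int) :=
    links.foldl (fun d p => d.modify p.1 [] (· ++ [p.2])) PySem.Dict.empty
  let best : PySem.Dict Int Int :=
    (PySem.List.pyRange 1 (PySem.List.len sales + 1) 1).foldl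
      (fun b i =>
        b.insert i ((children.getD i []).foldl (fun m c => min m (dic.getD c 0)) (dic.getD i 0)))
      PySem.Dict.empty
  links.foldl
    (fun ans q =>
      if best.contains q.1 ∧ children.getD q.2 [] ≠ [] then
        ans + min (dic.getD q.2 0) (best.getD q.1 0 + best.getD q.2 0)
      else ans)
    0

-- ===== PRECONDITION & SPEC =====
-- pvEff n x: the arr index Python's negative-index rule actually touches for arr[x] with len(arr) = n+1.
def pvEff (n x : Int) : Int := if x < 0 then x + n + 1 else x

-- Pre_solution: exactly the inputs where A returns normally — every link's first component is a valid
-- (possibly negative) Python index into arr (else IndexError), and every child of a node that gets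
-- processed (first component resolving to a node 1..n) is itself a node 1..n (else KeyError in find).
def Pre_solution (sales : List Int) (links : List (Int × Int)) : Prop :=
  ∀ q ∈ links,
    (-(sales.length : Int) - 1 ≤ q.1 ∧ q.1 ≤ (sales.length : Int)) ∧
    (1 ≤ pvEff (sales.length : Int) q.1 → 1 ≤ q.2 ∧ q.2 ≤ (sales.length : Int))
instance (sales : List Int) (links : List (Int × Int)) : Decidable (Pre_solution sales links) := by
  unfold Pre_solution; infer_instance

def pvWitness_solution : List Int × (List (Int × Int)) := ([5, 3], [(1, 2)])

-- On links containing an edge whose first component x is in [-n, -1] and whose wraparound is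
-- observable (its child has outgoing edges, or node n+1+x has another in- or out-edge), A
-- accidentally hangs the edge under node n+1+x by Python negative-index wraparound and adds that
-- node's subtree minima to the sum, while B counts only edges whose parent id is an actual node
-- 1..n — the intended reading, since node ids are 1..n.
def D_solution (sales : List Int) (links : List (Int × Int)) : Prop :=
  ∃ q ∈ links, q.1 < 0 ∧ -(sales.length : Int) ≤ q.1 ∧
    ∃ r ∈ links,
      pvEff (sales.length : Int) r.1 = q.2 ∨
      (r ≠ q ∧ pvEff (sales.length : Int) r.1 = q.1 + (sales.length : Int) + 1) ∨
      (1 ≤ pvEff (sales.length : Int) r.1 ∧ r.2 = q.1 + (sales.length : Int) + 1)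
instance (sales : List Int) (links : List (Int × Int)) : Decidable (D_solution sales links) := by
  unfold D_solution; infer_instance

def Spec_solution (sales : List Int) (links : List (Int × Int)) (out : Int) : Prop :=
  ¬ D_solution sales links → out = solution_alt sales links
instance (sales : List Int) (links : List (Int × Int)) (out : Int) :
    Decidable (Spec_solution sales links out) := by unfold Spec_solution; infer_instance

def pvDiffWitness_solution : List Int × (List (Int × Int)) := ([3, 1, 2], [(-1, 2), (2, 3)])
def pvDiffWitnessOut_solution : Int × Int := (3, 0)

-- ===== CLAIM (what is proved, stated in full; the proofs are below) =====
def Claim_unchanged_solution : Prop := ∀ (sales : List Int) (links : List (Int × Int)), Dom_solution sales links → Pre_solution sales links → Spec_solution sales links (solution sales links)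
def Claim_changed_solution : Prop := Dom_solution (pvDiffWitness_solution.1) (pvDiffWitness_solution.2) ∧ Pre_solution (pvDiffWitness_solution.1) (pvDiffWitness_solution.2) ∧ D_solution (pvDiffWitness_solution.1) (pvDiffWitness_solution.2) ∧ solution (pvDiffWitness_solution.1) (pvDiffWitness_solution.2) = pvDiffWitnessOut_solution.1 ∧ solution_alt (pvDiffWitness_solution.1) (pvDiffWitness_solution.2) = pvDiffWitnessOut_solution.2 ∧ pvDiffWitnessOut_solution.1 ≠ pvDiffWitnessOut_solution.2

-- ===== LEMMAS AND PROOFS =====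

def pvDic (sales : List Int) : PySem.Dict Int Int :=
  (PySem.List.pyRange 0 (PySem.List.len sales) 1).foldl
    (fun d i => d.insert (i + 1) (PySem.List.pyGetD sales i 0)) PySem.Dict.empty
def pvV (sales : List Int) (k : Int) : Int := (pvDic sales).getD k 0
def pvChE (sales : List Int) (links : List (Int × Int)) (i : Int) : List Int :=
  (links.filter (fun q => pvEff (sales.length : Int) q.1 == i)).map (·.2)
def pvBE (sales : List Int) (links : List (Int × Int)) (i : Int) : Int :=
  (pvChE sales links i).foldl (fun m a => min m (pvV sales a)) (pvV sales i)
def pvF (sales : List Int) (links : List (Int × Int)) (i a : Int) : Int :=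
  if pvChE sales links a = [] then 0
  else min (pvV sales a) (pvBE sales links i + pvBE sales links a)

def pvArr0 (sales : List Int) : List (List Int) :=
  (PySem.List.pyRange 0 (PySem.List.len sales + 1) 1).map (fun _ => [])
def pvArr (sales : List Int) (links : List (Int × Int)) : List (List Int) :=
  links.foldl
    (fun ar q => PySem.List.pySetD ar q.1 (PySem.List.pyGetD ar q.1 [] ++ [q.2])) (pvArr0 sales)

-- length is preserved by the arr-building fold
lemma pv_len_foldl (l : List (Int × Int)) :
    ∀ arr : List (List Int),
      (l.foldl (fun ar q => PySem.List.pySetD ar q.1 (PySem.List.pyGetD ar q.1 [] ++ [q.2])) arr).length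
        = arr.length := by
  induction l with
  | nil => intro arr; rfl
  | cons q l ih =>
      intro arr
      simp only [List.foldl_cons, ih, PySem.List.length_pySetD]

lemma pv_arr0_length (sales : List Int) : (pvArr0 sales).length = sales.length + 1 := by
  simp [pvArr0, PySem.List.length_pyRange_one]

lemma pv_arr_length (sales : List Int) (links : List (Int × Int)) :
    (pvArr sales links).length = sales.length + 1 := by
  rw [pvArr, pv_len_foldl, pv_arr0_length]

lemma pv_step_getD (N : Int) (arr : List (List Int)) (harr : (arr.length : Int) = N + 1)
    (x : Int) (hx : -N - 1 ≤ x ∧ x ≤ N) (v : List Int) (i : Int) (hi : 1 ≤ i ∧ i ≤ N) :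
    PySem.List.pyGetD (PySem.List.pySetD arr x v) i [] =
      if pvEff N x = i then v else PySem.List.pyGetD arr i [] := by
  have hset : PySem.List.pySetD arr x v = arr.set (pvEff N x).toNat v := by
    simp only [PySem.List.pySetD, PySem.List.pySet?, PySem.List.pyIdx?, pvEff]
    split_ifs with h1 h2 h3 <;> simp_all <;> try omega
    · congr 1; omega
  have hlt : i.toNat < (arr.set (pvEff N x).toNat v).length := by
    simp only [List.length_set]; omega
  rw [hset, PySem.List.pyGetD_eq_getElem _ [] (by omega)
        (by push_cast [List.length_set]; omega),
      List.getElem_set]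
  have heq : ((pvEff N x).toNat = i.toNat) ↔ (pvEff N x = i) := by
    unfold pvEff; split_ifs <;> omega
  by_cases h : pvEff N x = i
  · rw [if_pos (heq.2 h), if_pos h]
  · rw [if_neg (fun hh => h (heq.1 hh)), if_neg h,
        PySem.List.pyGetD_eq_getElem _ [] (by omega) (by omega)]

lemma pv_getD_wrap (N : Int) (arr : List (List Int)) (harr : (arr.length : Int) = N + 1)
    (x i : Int) (hx : -N - 1 ≤ x) (hxneg : x < 0) (heq : x + N + 1 = i) :
    PySem.List.pyGetD arr x ([] : List Int) = PySem.List.pyGetD arr i [] := by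
  simp only [PySem.List.pyGetD, PySem.List.pyGet?, PySem.List.pyIdx?]
  split_ifs <;> try omega
  have hidx : arr.length - (-x).toNat = i.toNat := by omega
  rw [hidx]

lemma pv_arr_fold_getD (N : Int) (l : List (Int × Int))
    (hl : ∀ q ∈ l, -N - 1 ≤ q.1 ∧ q.1 ≤ N) :
    ∀ arr : List (List Int), (arr.length : Int) = N + 1 → ∀ i : Int, 1 ≤ i ∧ i ≤ N →
      PySem.List.pyGetD
          (l.foldl (fun ar q => PySem.List.pySetD ar q.1 (PySem.List.pyGetD ar q.1 [] ++ [q.2])) arr) i []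
        = PySem.List.pyGetD arr i [] ++ (l.filter (fun q => pvEff N q.1 == i)).map (·.2) := by
  induction l with
  | nil => intro arr _ i _; simp
  | cons q l ih =>
      intro arr harr i hi
      have hq := hl q List.mem_cons_self
      have hlen2 : ((PySem.List.pySetD arr q.1 (PySem.List.pyGetD arr q.1 [] ++ [q.2])).length : Int) = N + 1 := by
        rw [PySem.List.length_pySetD]; exact harr
      simp only [List.foldl_cons, List.filter_cons]
      rw [ih (fun r hr => hl r (List.mem_cons_of_mem _ hr)) _ hlen2 i hi]
      rw [pv_step_getD N arr harr q.1 hq _ i hi]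
      by_cases h : pvEff N q.1 = i
      · have hread : PySem.List.pyGetD arr q.1 ([] : List Int) = PySem.List.pyGetD arr i [] := by
          rcases lt_or_ge q.1 0 with hneg | hpos
          · exact pv_getD_wrap N arr harr q.1 i hq.1 hneg (by unfold pvEff at h; omega)
          · have : q.1 = i := by unfold pvEff at h; omega
            rw [this]
        simp [h, hread, List.append_assoc]
      · have : (pvEff N q.1 == i) = false := by simp [h]
        simp [if_neg h, this]

lemma pv_arr_getD (sales : List Int) (links : List (Int × Int))
    (hP : Pre_solution sales links) (i : Int) (hi : 1 ≤ i ∧ i ≤ (sales.length : Int)) :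
    PySem.List.pyGetD (pvArr sales links) i [] = pvChE sales links i := by
  have h := pv_arr_fold_getD (sales.length : Int) links
    (fun q hq => (hP q hq).1) (pvArr0 sales) (by rw [pv_arr0_length]; push_cast; ring) i hi
  rw [pvArr, h, pvChE]
  have h0 : PySem.List.pyGetD (pvArr0 sales) i [] = ([] : List Int) := by
    rw [pvArr0]
    have := PySem.List.pyGetD_map_pyRange_of_nonneg (fun _ => ([] : List Int))
      (PySem.List.len sales + 1) i [] (by omega)
      (by simp only [PySem.List.len_eq]; omega)
    simpa using this
  rw [h0, List.nil_append]

lemma pv_find_fst (g : Int → Int) (l : List Int) :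
    ∀ m0 k0 : Int,
      (l.foldl (fun p a => if p.1 > g a then (g a, a) else p) (m0, k0)).1
        = l.foldl (fun m a => min m (g a)) m0 := by
  induction l with
  | nil => intro m0 k0; rfl
  | cons a l ih =>
      intro m0 k0
      simp only [List.foldl_cons]
      by_cases h : m0 > g a
      · rw [if_pos h]
        rw [ih]
        congr 1
        omega
      · rw [if_neg h]
        rw [ih]
        congr 1
        omega

lemma pv_findA_fst (sales : List Int) (links : List (Int × Int))
    (hP : Pre_solution sales links) (i : Int) (hi : 1 ≤ i ∧ i ≤ (sales.length : Int)) :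
    (pvFindA (pvDic sales) (pvArr sales links) i).1 = pvBE sales links i := by
  rw [pvFindA, pv_arr_getD sales links hP i hi, pv_find_fst]
  rfl

lemma pv_min_if (x s : Int) : (if x < s then x else s) = min x s := by
  rcases le_total x s with h | h <;> simp [min_def] <;> omega

lemma pv_inner_sum (dic : PySem.Dict Int Int) (arr : List (List Int)) (i : Int) (l : List Int) :
    ∀ acc : List (Int × Int),
      (((l.foldl (fun acc2 a =>
          if (PySem.List.pyGetD arr a []).length ≠ 0 then
            if dic.getD a 0 < (pvFindA dic arr i).1 + (pvFindA dic arr a).1 then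
              acc2 ++ [(dic.getD a 0, a)]
            else acc2 ++ [pvFindA dic arr i, pvFindA dic arr a]
          else acc2) acc)).map (·.1)).sum
      = ((acc.map (·.1)).sum) + (l.map (fun a =>
          if (PySem.List.pyGetD arr a []).length ≠ 0 then
            if dic.getD a 0 < (pvFindA dic arr i).1 + (pvFindA dic arr a).1 then dic.getD a 0
            else (pvFindA dic arr i).1 + (pvFindA dic arr a).1
          else 0)).sum := by
  induction l with
  | nil => intro acc; simp
  | cons a l ih =>
      intro acc
      simp only [List.foldl_cons, List.map_cons, List.sum_cons]
      split_ifs with h1 h2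
      · rw [ih]; simp; ring
      · rw [ih]; simp; ring
      · rw [ih]; simp

lemma pv_outer_sum (dic : PySem.Dict Int Int) (arr : List (List Int)) (L : List Int) :
    ∀ acc : List (Int × Int),
      (((L.foldl (fun acc i =>
          if (PySem.List.pyGetD arr i []).length = 0 then acc
          else
            (PySem.List.pyGetD arr i []).foldl (fun acc2 a =>
              if (PySem.List.pyGetD arr a []).length ≠ 0 then
                if dic.getD a 0 < (pvFindA dic arr i).1 + (pvFindA dic arr a).1 then
                  acc2 ++ [(dic.getD a 0, a)]
                else acc2 ++ [pvFindA dic arr i, pvFindA dic arr a]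
              else acc2) acc) acc)).map (·.1)).sum
      = ((acc.map (·.1)).sum) + (L.map (fun i =>
          if (PySem.List.pyGetD arr i []).length = 0 then 0
          else ((PySem.List.pyGetD arr i []).map (fun a =>
            if (PySem.List.pyGetD arr a []).length ≠ 0 then
              if dic.getD a 0 < (pvFindA dic arr i).1 + (pvFindA dic arr a).1 then dic.getD a 0
              else (pvFindA dic arr i).1 + (pvFindA dic arr a).1
            else 0)).sum)).sum := by
  induction L with
  | nil => intro acc; simp
  | cons i L ih =>
      intro acc
      simp only [List.foldl_cons, List.map_cons, List.sum_cons]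
      split_ifs with h1
      · rw [ih]; simp
      · rw [ih, pv_inner_sum]; ring

theorem solution_eq_sum (sales : List Int) (links : List (Int × Int))
    (hP : Pre_solution sales links) :
    solution sales links =
      ((PySem.List.pyRange 1 ((sales.length : Int) + 1) 1).map
        (fun i => ((pvChE sales links i).map (fun a => pvF sales links i a)).sum)).sum := by
  have hlen : PySem.List.len (pvArr sales links) = (sales.length : Int) + 1 := by
    simp [PySem.List.len_eq, pv_arr_length]
  have hunf : solution sales links =
      ((PySem.List.pyRange 1 (PySem.List.len (pvArr sales links)) 1).foldl
        (fun acc i =>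
          if (PySem.List.pyGetD (pvArr sales links) i []).length = 0 then acc
          else
            (PySem.List.pyGetD (pvArr sales links) i []).foldl (fun acc2 a =>
              if (PySem.List.pyGetD (pvArr sales links) a []).length ≠ 0 then
                if (pvDic sales).getD a 0 <
                    (pvFindA (pvDic sales) (pvArr sales links) i).1 +
                    (pvFindA (pvDic sales) (pvArr sales links) a).1 then
                  acc2 ++ [((pvDic sales).getD a 0, a)]
                else acc2 ++ [pvFindA (pvDic sales) (pvArr sales links) i,
                              pvFindA (pvDic sales) (pvArr sales links) a]
              else acc2) acc) ([] : List (Int × Int))).foldl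
        (fun s q => s + q.1) 0 := rfl
  rw [hunf, hlen, PySem.List.foldl_add, pv_outer_sum]
  simp only [List.map_nil, List.sum_nil, zero_add]
  refine congrArg _ (List.map_congr_left (fun i hi => ?_))
  have hi' : 1 ≤ i ∧ i ≤ (sales.length : Int) := by
    rw [PySem.List.mem_pyRange_one] at hi; omega
  rw [pv_arr_getD sales links hP i hi']
  by_cases hempty : pvChE sales links i = []
  · simp [hempty]
  · rw [if_neg (by simpa [List.length_eq_zero_iff] using hempty)]
    refine congrArg _ (List.map_congr_left (fun a ha => ?_))
    have ha' : 1 ≤ a ∧ a ≤ (sales.length : Int) := by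
      rw [pvChE, List.mem_map] at ha
      obtain ⟨q, hqf, hqa⟩ := ha
      rw [List.mem_filter] at hqf
      have := (hP q hqf.1).2
      have heff : pvEff (sales.length : Int) q.1 = i := by simpa using hqf.2
      subst hqa
      exact this (by omega)
    rw [pv_arr_getD sales links hP a ha',
        pv_findA_fst sales links hP i hi', pv_findA_fst sales links hP a ha']
    by_cases he : pvChE sales links a = []
    · simp [he, pvF]
    · rw [if_pos (by simpa [List.length_eq_zero_iff] using he), pvF, if_neg he, pv_min_if]
      rfl

def pvChR (links : List (Int × Int)) (i : Int) : List Int :=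
  (links.filter (fun q => q.1 == i)).map (·.2)
def pvBR (sales : List Int) (links : List (Int × Int)) (i : Int) : Int :=
  (pvChR links i).foldl (fun m a => min m (pvV sales a)) (pvV sales i)
def pvG (sales : List Int) (links : List (Int × Int)) (q : Int × Int) : Int :=
  if (1 ≤ q.1 ∧ q.1 ≤ (sales.length : Int)) ∧ pvChR links q.2 ≠ [] then
    min (pvV sales q.2) (pvBR sales links q.1 + pvBR sales links q.2)
  else 0

lemma pvDicB_eq (sales : List Int) :
    (PySem.List.enumerate sales 0).foldl (fun d p => d.insert (p.1 + 1) p.2)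
      (PySem.Dict.empty : PySem.Dict Int Int) = pvDic sales := by
  rw [PySem.List.enumerate_eq_map_pyRange (xs := sales) 0, List.foldl_map]; rfl

lemma pvChD_getD (links : List (Int × Int)) (c : Int) :
    ((links.foldl (fun d p => d.modify p.1 [] (· ++ [p.2]))
        (PySem.Dict.empty : PySem.Dict Int (List Int))).getD c []) = pvChR links c := by
  rw [PySem.Dict.getD_foldl_modify_append]; simp [pvChR]

def pvBestB (sales : List Int) (links : List (Int × Int)) : PySem.Dict Int Int :=
  (PySem.List.pyRange 1 (PySem.List.len sales + 1) 1).foldl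
    (fun b i =>
      b.insert i
        (((links.foldl (fun d p => d.modify p.1 [] (· ++ [p.2])) PySem.Dict.empty).getD i []).foldl
          (fun m c => min m ((pvDic sales).getD c 0)) ((pvDic sales).getD i 0)))
    PySem.Dict.empty

lemma pvBestB_items (sales : List Int) (links : List (Int × Int)) :
    (pvBestB sales links).items =
      (PySem.List.pyRange 1 ((sales.length : Int) + 1) 1).map (fun i => (i, pvBR sales links i)) := by
  unfold pvBestB
  rw [PySem.Dict.items_foldl_insert_fresh]
  · simp only [PySem.List.len_eq]
    refine List.map_congr_left (fun i _ => ?_)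
    rw [pvChD_getD]; rfl
  · intro x hx; simp
  · simp [PySem.List.nodup_pyRange_one]

lemma pvBestB_contains (sales : List Int) (links : List (Int × Int)) (x : Int) :
    (pvBestB sales links).contains x = true ↔ (1 ≤ x ∧ x ≤ (sales.length : Int)) := by
  rw [PySem.Dict.contains_iff_mem_keys]
  have : (pvBestB sales links).keys = PySem.List.pyRange 1 ((sales.length : Int) + 1) 1 := by
    simp only [PySem.Dict.keys, pvBestB_items, List.map_map]
    exact List.map_id _
  rw [this, PySem.List.mem_pyRange_one]
  omega

lemma pvBestB_nodupkeys (sales : List Int) (links : List (Int × Int)) :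
    (pvBestB sales links).keys.Nodup := by
  unfold pvBestB
  exact PySem.Dict.nodup_keys_foldl_insert _ _ _ (by simp)

lemma pvBestB_getD (sales : List Int) (links : List (Int × Int)) (x : Int)
    (hx : 1 ≤ x ∧ x ≤ (sales.length : Int)) :
    (pvBestB sales links).getD x 0 = pvBR sales links x := by
  refine PySem.Dict.getD_of_mem_items _ ?_ (pvBestB_nodupkeys sales links) 0
  rw [pvBestB_items]
  exact List.mem_map_of_mem (by rw [PySem.List.mem_pyRange_one]; omega)

theorem solution_alt_eq_sum (sales : List Int) (links : List (Int × Int))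
    (hP : Pre_solution sales links) :
    solution_alt sales links = (links.map (fun q => pvG sales links q)).sum := by
  have hstep :
      (fun (ans : Int) (q : Int × Int) =>
        if (pvBestB sales links).contains q.1 ∧
            ((links.foldl (fun d p => d.modify p.1 [] (· ++ [p.2])) PySem.Dict.empty).getD q.2 []) ≠ [] then
          ans + min ((pvDic sales).getD q.2 0)
            ((pvBestB sales links).getD q.1 0 + (pvBestB sales links).getD q.2 0)
        else ans) =
      (fun (ans : Int) (q : Int × Int) =>
        ans + if (pvBestB sales links).contains q.1 ∧
            ((links.foldl (fun d p => d.modify p.1 [] (· ++ [p.2])) PySem.Dict.empty).getD q.2 []) ≠ [] then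
          min ((pvDic sales).getD q.2 0)
            ((pvBestB sales links).getD q.1 0 + (pvBestB sales links).getD q.2 0)
        else 0) := by
    funext ans q; split <;> simp
  rw [show solution_alt sales links =
      links.foldl
        (fun ans q =>
          if (pvBestB sales links).contains q.1 ∧
              ((links.foldl (fun d p => d.modify p.1 [] (· ++ [p.2])) PySem.Dict.empty).getD q.2 []) ≠ [] then
            ans + min ((pvDic sales).getD q.2 0)
              ((pvBestB sales links).getD q.1 0 + (pvBestB sales links).getD q.2 0)
          else ans) 0 from by
    unfold solution_alt
    rw [pvDicB_eq]; rfl]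
  rw [hstep, PySem.List.foldl_add]
  rw [zero_add]
  refine congrArg _ (List.map_congr_left (fun q hq => ?_))
  rw [pvChD_getD]
  rcases Decidable.em ((pvBestB sales links).contains q.1 = true ∧ pvChR links q.2 ≠ []) with h | h
  · have hx := (pvBestB_contains sales links q.1).1 h.1
    have hy : 1 ≤ q.2 ∧ q.2 ≤ (sales.length : Int) := by
      have := (hP q hq).2
      apply this
      simp only [pvEff]
      omega
    rw [if_pos h, pvBestB_getD sales links _ hx, pvBestB_getD sales links _ hy]
    rw [pvG, if_pos ⟨hx, h.2⟩]
    rfl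
  · rw [if_neg h, pvG, if_neg]
    intro hc
    exact h ⟨(pvBestB_contains sales links q.1).2 hc.1, hc.2⟩

lemma pv_sum_ite_mem (c : Int) (h : Int → Int) (I : List Int) (hI : I.Nodup) :
    (I.map (fun i => if c = i then h i else 0)).sum = if c ∈ I then h c else 0 := by
  induction I with
  | nil => simp
  | cons i I ih =>
      have hni : i ∉ I := (List.nodup_cons.1 hI).1
      have hI' : I.Nodup := (List.nodup_cons.1 hI).2
      simp only [List.map_cons, List.sum_cons, List.mem_cons]
      by_cases h1 : c = i
      · subst h1
        rw [if_pos rfl, ih hI', if_neg hni, if_pos (Or.inl rfl)]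
        ring
      · rw [if_neg h1, ih hI']
        by_cases h2 : c ∈ I
        · rw [if_pos h2, if_pos (Or.inr h2)]; ring
        · rw [if_neg h2, if_neg (by tauto)]; ring

lemma pv_regroup (e : Int → Int) (F : Int → Int → Int) (I : List Int) (hI : I.Nodup) :
    ∀ l : List (Int × Int),
      (I.map (fun i => ((l.filter (fun q => e q.1 == i)).map (fun q => F i q.2)).sum)).sum
        = (l.map (fun q => if e q.1 ∈ I then F (e q.1) q.2 else 0)).sum := by
  intro l
  induction l with
  | nil => simp
  | cons q l ih =>
      simp only [List.filter_cons, List.map_cons, List.sum_cons]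
      have hsplit :
          (I.map (fun i =>
            ((if e q.1 == i then q :: l.filter (fun r => e r.1 == i)
              else l.filter (fun r => e r.1 == i)).map (fun r => F i r.2)).sum)).sum
          = (I.map (fun i => (if e q.1 = i then F i q.2 else 0)
              + ((l.filter (fun r => e r.1 == i)).map (fun r => F i r.2)).sum)).sum := by
        refine congrArg _ (List.map_congr_left (fun i _ => ?_))
        by_cases h : e q.1 = i
        · simp [h]
        · have : (e q.1 == i) = false := by simp [h]
          simp [this, h]
      rw [hsplit, PySem.List.sum_map_add_int, pv_sum_ite_mem _ _ I hI, ih]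

lemma pv_chE_eq_nil (sales : List Int) (links : List (Int × Int)) (a : Int)
    (h : ∀ r ∈ links, pvEff (sales.length : Int) r.1 ≠ a) :
    pvChE sales links a = [] := by
  unfold pvChE
  rw [List.filter_eq_nil_iff.2 (fun r hr => by simpa using h r hr)]
  rfl

lemma pv_chEq (sales : List Int) (links : List (Int × Int)) (hP : Pre_solution sales links)
    (a : Int) (ha : 1 ≤ a)
    (hnw : ∀ r ∈ links, r.1 < 0 → -(sales.length : Int) ≤ r.1 →
            r.1 + (sales.length : Int) + 1 ≠ a) :
    pvChE sales links a = pvChR links a := by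
  unfold pvChE pvChR
  refine congrArg _ (List.filter_congr (fun r hr => ?_))
  have hb := (hP r hr).1
  show (pvEff (sales.length : Int) r.1 == a) = (r.1 == a)
  have : (pvEff (sales.length : Int) r.1 = a) ↔ (r.1 = a) := by
    unfold pvEff
    by_cases hneg : r.1 < 0
    · rw [if_pos hneg]
      constructor
      · intro h
        by_cases h2 : -(sales.length : Int) ≤ r.1
        · exact absurd h (hnw r hr hneg h2)
        · omega
      · omega
    · rw [if_neg hneg]
  simp only [beq_eq_decide]
  exact decide_eq_decide.mpr this

lemma pv_bEq (sales : List Int) (links : List (Int × Int)) (hP : Pre_solution sales links)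
    (a : Int) (ha : 1 ≤ a)
    (hnw : ∀ r ∈ links, r.1 < 0 → -(sales.length : Int) ≤ r.1 →
            r.1 + (sales.length : Int) + 1 ≠ a) :
    pvBE sales links a = pvBR sales links a := by
  rw [pvBE, pvBR, pv_chEq sales links hP a ha hnw]

theorem sums_eq (sales : List Int) (links : List (Int × Int))
    (hP : Pre_solution sales links) (hD : ¬ D_solution sales links) :
    ((PySem.List.pyRange 1 ((sales.length : Int) + 1) 1).map
      (fun i => ((pvChE sales links i).map (fun a => pvF sales links i a)).sum)).sum
    = (links.map (fun q => pvG sales links q)).sum := by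
  have hchE : ∀ i, (pvChE sales links i).map (fun a => pvF sales links i a)
      = (links.filter (fun q => pvEff (sales.length : Int) q.1 == i)).map
          (fun q => pvF sales links i q.2) := by
    intro i; rw [pvChE, List.map_map]; rfl
  simp only [hchE]
  rw [pv_regroup (pvEff (sales.length : Int)) (fun i a => pvF sales links i a)
      _ (PySem.List.nodup_pyRange_one 1 ((sales.length : Int) + 1)) links]
  refine congrArg _ (List.map_congr_left (fun q hq => ?_))
  rw [D_solution] at hD
  push Not at hD
  have hDall := hD
  set N := (sales.length : Int) with hN
  have hb := (hP q hq).1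
  by_cases hx1 : 1 ≤ q.1
  · -- real node parent
    have heff : pvEff N q.1 = q.1 := by unfold pvEff; omega
    rw [heff, if_pos (by rw [PySem.List.mem_pyRange_one]; omega)]
    have hy : 1 ≤ q.2 ∧ q.2 ≤ N := (hP q hq).2 (by rw [heff]; omega)
    have hwx : ∀ r ∈ links, r.1 < 0 → -N ≤ r.1 → r.1 + N + 1 ≠ q.1 := by
      intro r hr h1 h2 hcon
      refine (hDall r hr h1 h2 q hq).2.1 (fun h => absurd hx1 (by rw [h]; omega)) ?_
      rw [heff, hcon]
    have hwy : ∀ r ∈ links, r.1 < 0 → -N ≤ r.1 → r.1 + N + 1 ≠ q.2 := by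
      intro r hr h1 h2 hcon
      exact (hDall r hr h1 h2 q hq).2.2 (by rw [heff]; omega) hcon.symm
    rw [pvF, pvG, pv_chEq sales links hP q.2 hy.1 hwy,
        pv_bEq sales links hP q.1 hx1 hwx, pv_bEq sales links hP q.2 hy.1 hwy]
    by_cases he : pvChR links q.2 = []
    · rw [if_pos he, if_neg (fun hcon => hcon.2 he)]
    · rw [if_neg he, if_pos ⟨⟨hx1, hb.2⟩, he⟩]
  · -- parent id not a node: 0 or negative
    have hg : pvG sales links q = 0 := by
      rw [pvG, if_neg (fun hcon => hx1 hcon.1.1)]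
    rw [hg]
    by_cases hneg : q.1 < 0
    · by_cases hwrap : -N ≤ q.1
      · -- wrapped edge, not observable: its child has no outgoing edges
        have hchild : pvChE sales links q.2 = [] := by
          refine pv_chE_eq_nil sales links q.2 (fun r hr hcon => ?_)
          exact (hDall q hq hneg hwrap r hr).1 hcon
        by_cases hmem : pvEff N q.1 ∈ PySem.List.pyRange 1 (N + 1) 1
        · rw [if_pos hmem, pvF, if_pos hchild]
        · rw [if_neg hmem]
      · -- q.1 = -N-1: resolves to arr[0], never processed
        have heff : pvEff N q.1 = 0 := by unfold pvEff; omega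
        rw [if_neg (by rw [heff, PySem.List.mem_pyRange_one]; omega)]
    · -- q.1 = 0
      have heff : pvEff N q.1 = q.1 := by unfold pvEff; omega
      rw [if_neg (by rw [heff, PySem.List.mem_pyRange_one]; omega)]

-- ===== VERDICT (by name: the statement is the Claim_ definition above) =====
theorem solution_spec : Claim_unchanged_solution := by
  intro sales links _hDom hP hnD
  rw [solution_eq_sum sales links hP, solution_alt_eq_sum sales links hP,
      sums_eq sales links hP hnD]

theorem solution_changed : Claim_changed_solution := by
  unfold Claim_changed_solution; decide
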